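-- pv_equiv track=rewrite | github.com/senjoyee/sap-ewa-analyzer | backend/utils/chapter_merge.py | _derive_health_overview
-- ===== SOURCE A (Python) =====
-- from typing import Dict, Any, List
--
-- def _derive_health_overview(chapter_analyses: List[Dict[str, Any]]) -> Dict[str, str]:
--     """Derive system health overview from chapter findings."""
--     # Count severity levels across all chapters
--     severity_counts = {"critical": 0, "high": 0, "medium": 0}
--     area_findings = {
--         "performance": [],
--         "security": [],
--         "stability": [],
--         "configuration": []
--     }
--
--     for chapter in chapter_analyses:
--         for finding in chapter.get("key_findings", []):
--             severity = finding.get("severity", "medium").lower()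
--             area = finding.get("area", "").lower()
--
--             if severity in severity_counts:
--                 severity_counts[severity] += 1
--
--             # Map areas to health categories
--             if "performance" in area or "workload" in area:
--                 area_findings["performance"].append(severity)
--             if "security" in area or "compliance" in area:
--                 area_findings["security"].append(severity)
--             if "stability" in area or "backup" in area or "recovery" in area:
--                 area_findings["stability"].append(severity)
--             if "configuration" in area or "house-keeping" in area:
--                 area_findings["configuration"].append(severity)
--
--     # Derive ratings based on findings
--     def rate_area(findings):
--         if not findings:
--             return "good"
--         if "critical" in findings or findings.count("high") >= 2:
--             return "poor"
--         if "high" in findings or findings.count("medium") >= 3: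
--             return "fair"
--         return "good"
--
--     return {
--         "Performance": rate_area(area_findings["performance"]),
--         "Security": rate_area(area_findings["security"]),
--         "Stability": rate_area(area_findings["stability"]),
--         "configuration": rate_area(area_findings["configuration"])
--     }
-- ===== SOURCE B (Python) =====
-- from typing import Dict, Any, List
--
-- def _derive_health_overview(chapter_analyses: List[Dict[str, Any]]) -> Dict[str, str]:
--     """Derive system health overview from chapter findings (flatten-then-filter)."""
--     pairs = [
--         (f.get("area", "").lower(), f.get("severity", "medium").lower())
--         for ch in chapter_analyses
--         for f in ch.get("key_findings", [])
--     ]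
--     categories = [
--         ("Performance", ["performance", "workload"]),
--         ("Security", ["security", "compliance"]),
--         ("Stability", ["stability", "backup", "recovery"]),
--         ("configuration", ["configuration", "house-keeping"]),
--     ]
--
--     def rate(sevs):
--         if not sevs:
--             return "good"
--         if "critical" in sevs or sevs.count("high") >= 2:
--             return "poor"
--         if "high" in sevs or sevs.count("medium") >= 3:
--             return "fair"
--         return "good"
--
--     return {
--         name: rate([s for a, s in pairs if any(k in a for k in kws)])
--         for name, kws in categories
--     }
-- ===== Notes on version B (the rewrite author's own statement) =====
-- stated objective: alternative
-- what changed: Replaces A's single-pass accumulation into four area buckets (plus an unused severity counter) by flattening all findings into one (area, severity) pair list and deriving each category's rating by filtering that list against a keyword table.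
import Mathlib
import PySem

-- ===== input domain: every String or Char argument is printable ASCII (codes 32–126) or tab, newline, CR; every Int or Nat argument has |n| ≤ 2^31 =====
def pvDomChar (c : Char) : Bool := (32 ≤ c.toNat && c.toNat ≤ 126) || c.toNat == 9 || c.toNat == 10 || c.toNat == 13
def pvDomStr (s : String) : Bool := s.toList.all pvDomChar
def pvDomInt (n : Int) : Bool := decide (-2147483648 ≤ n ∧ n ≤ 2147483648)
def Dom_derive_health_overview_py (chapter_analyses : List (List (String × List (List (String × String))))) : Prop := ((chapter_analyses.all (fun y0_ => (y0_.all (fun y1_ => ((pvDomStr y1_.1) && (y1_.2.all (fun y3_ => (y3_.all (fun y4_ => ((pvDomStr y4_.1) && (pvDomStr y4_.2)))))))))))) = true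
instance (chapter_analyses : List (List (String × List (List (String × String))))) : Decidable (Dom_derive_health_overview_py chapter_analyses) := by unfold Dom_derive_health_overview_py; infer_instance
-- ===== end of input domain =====

-- B flattens all findings into one (area, severity) list and rates each category by
-- filtering it against a keyword table, instead of A's one-pass bucket accumulation
-- (objective: alternative decomposition, same cost).


-- ===== PORT A =====
-- A's loop state: (severity_counts, performance, security, stability, configuration)
def pvStateA : Type := PySem.Dict String Int × List String × List String × List String × List String

-- the body of A's inner 'for finding in …' loop, statement for statement
def pvStepA (st : pvStateA) (finding : List (String × String)) : pvStateA :=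
  let severity := PySem.Str.lower (PySem.Dict.getD (PySem.Dict.mk finding) "severity" "medium")
  let area := PySem.Str.lower (PySem.Dict.getD (PySem.Dict.mk finding) "area" "")
  let sc := if (st.1).contains severity then (st.1).modify severity 0 (· + 1) else st.1
  let perf := if PySem.Str.isIn "performance" area || PySem.Str.isIn "workload" area then st.2.1 ++ [severity] else st.2.1
  let sec := if PySem.Str.isIn "security" area || PySem.Str.isIn "compliance" area then st.2.2.1 ++ [severity] else st.2.2.1
  let stab := if PySem.Str.isIn "stability" area || PySem.Str.isIn "backup" area || PySem.Str.isIn "recovery" area then st.2.2.2.1 ++ [severity] else st.2.2.2.1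
  let conf := if PySem.Str.isIn "configuration" area || PySem.Str.isIn "house-keeping" area then st.2.2.2.2 ++ [severity] else st.2.2.2.2
  (sc, perf, sec, stab, conf)

-- rate_area: Python's nested helper, branch for branch
def ratePy (findings : List String) : String :=
  if findings = [] then "good"
  else if findings.contains "critical" || decide (PySem.List.count findings "high" ≥ 2) then "poor"
  else if findings.contains "high" || decide (PySem.List.count findings "medium" ≥ 3) then "fair"
  else "good"

def derive_health_overview_py (chapter_analyses : List (List (String × List (List (String × String))))) : List (String × String) :=
  let init : pvStateA :=
    (PySem.Dict.ofList [("critical", 0), ("high", 0), ("medium", 0)], [], [], [], [])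
  let st := chapter_analyses.foldl (fun st chapter =>
    (PySem.Dict.getD (PySem.Dict.mk chapter) "key_findings" []).foldl pvStepA st) init
  [("Performance", ratePy st.2.1), ("Security", ratePy st.2.2.1),
   ("Stability", ratePy st.2.2.2.1), ("configuration", ratePy st.2.2.2.2)]

-- ===== PORT B =====
-- rate: B's nested helper (same rating rule, as in Source B)
def rateAlt (sevs : List String) : String :=
  if sevs = [] then "good"
  else if sevs.contains "critical" || decide (PySem.List.count sevs "high" ≥ 2) then "poor"
  else if sevs.contains "high" || decide (PySem.List.count sevs "medium" ≥ 3) then "fair"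
  else "good"

def derive_health_overview_py_alt (chapter_analyses : List (List (String × List (List (String × String))))) : List (String × String) :=
  let pairs := chapter_analyses.flatMap (fun ch =>
    (PySem.Dict.getD (PySem.Dict.mk ch) "key_findings" []).map (fun f =>
      (PySem.Str.lower (PySem.Dict.getD (PySem.Dict.mk f) "area" ""),
       PySem.Str.lower (PySem.Dict.getD (PySem.Dict.mk f) "severity" "medium"))))
  let categories : List (String × List String) :=
    [("Performance", ["performance", "workload"]),
     ("Security", ["security", "compliance"]),
     ("Stability", ["stability", "backup", "recovery"]),
     ("configuration", ["configuration", "house-keeping"])]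
  categories.map (fun c =>
    (c.1, rateAlt ((pairs.filter (fun p => c.2.any (fun k => PySem.Str.isIn k p.1))).map (·.2))))

-- ===== PRECONDITION & SPEC =====
def Spec_derive_health_overview_py (chapter_analyses : List (List (String × List (List (String × String))))) (out : List (String × String)) : Prop := out = derive_health_overview_py_alt chapter_analyses
instance (chapter_analyses : List (List (String × List (List (String × String))))) (out : List (String × String)) : Decidable (Spec_derive_health_overview_py chapter_analyses out) := by unfold Spec_derive_health_overview_py; infer_instance

-- ===== CLAIM (what is proved, stated in full; the proofs are below) =====
def Claim_equal_derive_health_overview_py : Prop := ∀ (chapter_analyses : List (List (String × List (List (String × String))))), Dom_derive_health_overview_py chapter_analyses → Spec_derive_health_overview_py chapter_analyses (derive_health_overview_py chapter_analyses)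

-- ===== LEMMAS AND PROOFS =====
-- the lowered (area, severity) pair B extracts from a finding
def pvPairOf (f : List (String × String)) : String × String :=
  (PySem.Str.lower (PySem.Dict.getD (PySem.Dict.mk f) "area" ""),
   PySem.Str.lower (PySem.Dict.getD (PySem.Dict.mk f) "severity" "medium"))

def pvSelPerf (p : String × String) : Bool := PySem.Str.isIn "performance" p.1 || PySem.Str.isIn "workload" p.1
def pvSelSec (p : String × String) : Bool := PySem.Str.isIn "security" p.1 || PySem.Str.isIn "compliance" p.1
def pvSelStab (p : String × String) : Bool := PySem.Str.isIn "stability" p.1 || PySem.Str.isIn "backup" p.1 || PySem.Str.isIn "recovery" p.1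
def pvSelConf (p : String × String) : Bool := PySem.Str.isIn "configuration" p.1 || PySem.Str.isIn "house-keeping" p.1

theorem pvInner (fs : List (List (String × String))) (st : pvStateA) :
    (fs.foldl pvStepA st).2 =
      (st.2.1 ++ ((fs.map pvPairOf).filter pvSelPerf).map (·.2),
       st.2.2.1 ++ ((fs.map pvPairOf).filter pvSelSec).map (·.2),
       st.2.2.2.1 ++ ((fs.map pvPairOf).filter pvSelStab).map (·.2),
       st.2.2.2.2 ++ ((fs.map pvPairOf).filter pvSelConf).map (·.2)) := by
  induction fs generalizing st with
  | nil => simp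
  | cons f rest ih =>
    simp only [List.foldl_cons, ih, List.map_cons, List.filter_cons]
    simp only [pvStepA, pvPairOf, pvSelPerf, pvSelSec, pvSelStab, pvSelConf]
    split_ifs <;> simp_all

theorem pvOuter (cs : List (List (String × List (List (String × String))))) (st : pvStateA) :
    (cs.foldl (fun st chapter =>
        (PySem.Dict.getD (PySem.Dict.mk chapter) "key_findings" []).foldl pvStepA st) st).2 =
      (st.2.1 ++ (((cs.flatMap (fun ch => (PySem.Dict.getD (PySem.Dict.mk ch) "key_findings" []).map pvPairOf)).filter pvSelPerf).map (·.2)),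
       st.2.2.1 ++ (((cs.flatMap (fun ch => (PySem.Dict.getD (PySem.Dict.mk ch) "key_findings" []).map pvPairOf)).filter pvSelSec).map (·.2)),
       st.2.2.2.1 ++ (((cs.flatMap (fun ch => (PySem.Dict.getD (PySem.Dict.mk ch) "key_findings" []).map pvPairOf)).filter pvSelStab).map (·.2)),
       st.2.2.2.2 ++ (((cs.flatMap (fun ch => (PySem.Dict.getD (PySem.Dict.mk ch) "key_findings" []).map pvPairOf)).filter pvSelConf).map (·.2))) := by
  induction cs generalizing st with
  | nil => simp
  | cons c rest ih =>
    simp only [List.foldl_cons, ih, List.flatMap_cons, List.filter_append, List.map_append]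
    rw [pvInner]
    simp

-- ===== VERDICT (by name: the statement is the Claim_ definition above) =====
theorem derive_health_overview_py_spec : Claim_equal_derive_health_overview_py := by
  intro ca _
  unfold Spec_derive_health_overview_py
  show derive_health_overview_py ca = derive_health_overview_py_alt ca
  unfold derive_health_overview_py derive_health_overview_py_alt
  have h := pvOuter ca (PySem.Dict.ofList [("critical", 0), ("high", 0), ("medium", 0)], [], [], [], [])
  simp only [List.map_cons, List.map_nil, List.any_cons, List.any_nil]
  rw [h]
  have e1 : (fun p : String × String => PySem.Str.isIn "performance" p.1 ||
      (PySem.Str.isIn "workload" p.1 || false)) = pvSelPerf := by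
    funext p; simp [pvSelPerf]
  have e2 : (fun p : String × String => PySem.Str.isIn "security" p.1 ||
      (PySem.Str.isIn "compliance" p.1 || false)) = pvSelSec := by
    funext p; simp [pvSelSec]
  have e3 : (fun p : String × String => PySem.Str.isIn "stability" p.1 ||
      (PySem.Str.isIn "backup" p.1 || (PySem.Str.isIn "recovery" p.1 || false))) = pvSelStab := by
    funext p; simp [pvSelStab, Bool.or_assoc]
  have e4 : (fun p : String × String => PySem.Str.isIn "configuration" p.1 ||
      (PySem.Str.isIn "house-keeping" p.1 || false)) = pvSelConf := by
    funext p; simp [pvSelConf]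
  simp only [List.nil_append, e1, e2, e3, e4]
  rfl
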